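-- pv_equiv track=rewrite | github.com/KonstantoJr/advent_of_code | 2023/Day_10/part2.py | path_to_edges
-- ===== SOURCE A (Python) =====
-- def path_to_edges(path):
--     edges = []
--     direction = None
--     for i, point in enumerate(path):
--         if i == 0:
--             edges.append([point, None])
--             continue
--         if i == 1:
--             # find if the direction is on the x or y axis
--             if point[0] == path[0][0]:
--                 direction = 'x'
--             elif point[1] == path[0][1]:
--                 direction = 'y'
--             else:
--                 raise Exception('Invalid path')
--             continue
--
--         current_direction = None
--         if point[0] == path[i - 1][0]:
--             current_direction = 'x'
--         elif point[1] == path[i - 1][1]: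
--             current_direction = 'y'
--         else:
--             raise Exception('Invalid path')
--
--         if current_direction != direction:
--             if edges[-1][1] is None:
--                 edges[-1][1] = path[i - 1]
--             edges.append([path[i - 1], None])
--             direction = current_direction
--     edges[-1][1] = path[-1]
--     return edges
-- ===== SOURCE B (Python) =====
-- def path_to_edges(path):
--     corners = [path[0]]
--     direction = None
--     prev = path[0]
--     for point in path[1:]:
--         if point[0] == prev[0]:
--             axis = 'x'
--         elif point[1] == prev[1]:
--             axis = 'y'
--         else:
--             raise Exception('Invalid path')
--         if direction is None:
--             direction = axis
--         elif axis != direction: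
--             corners.append(prev)
--             direction = axis
--         prev = point
--     corners.append(path[-1])
--     return [[corners[j], corners[j + 1]] for j in range(len(corners) - 1)]
-- ===== Notes on version B (the rewrite author's own statement) =====
-- stated objective: simpler
-- what changed: B collects the direction-change corner points in one list and zips consecutive corners into edges at the end, instead of A's in-place mutation of half-open [start, None] edge pairs (closing edges[-1][1] as it goes).
import Mathlib
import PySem

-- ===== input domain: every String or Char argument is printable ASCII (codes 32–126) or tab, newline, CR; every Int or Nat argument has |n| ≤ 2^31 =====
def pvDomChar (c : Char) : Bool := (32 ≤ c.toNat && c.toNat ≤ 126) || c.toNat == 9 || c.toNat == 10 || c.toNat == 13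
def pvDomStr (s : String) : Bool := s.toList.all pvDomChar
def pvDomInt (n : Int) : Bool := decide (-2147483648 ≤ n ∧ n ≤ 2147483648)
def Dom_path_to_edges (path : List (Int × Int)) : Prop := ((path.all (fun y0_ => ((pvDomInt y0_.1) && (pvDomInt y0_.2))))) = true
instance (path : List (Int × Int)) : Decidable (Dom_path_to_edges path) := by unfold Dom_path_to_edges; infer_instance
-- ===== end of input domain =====

-- B collects the direction-change corner points in one list and zips consecutive corners
-- into edges at the end, instead of A's in-place mutation of half-open [start, None] pairs.

-- ===== PORT A =====
-- direction 'x' is encoded as `some true`, 'y' as `some false`, Python None as `none`.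

-- Python `if edges[-1][1] is None: edges[-1][1] = p` (sets the last pair's 2nd slot if None)
def pvCloseLast : List ((Int × Int) × Option (Int × Int)) → (Int × Int) → List ((Int × Int) × Option (Int × Int))
  | [], _ => []
  | [e], p => [(e.1, if e.2 = none then some p else e.2)]
  | e :: e' :: es, p => e :: pvCloseLast (e' :: es) p

-- Python `edges[-1][1] = p` (unconditional; on [] Python would raise IndexError, handled at call site)
def pvSetLast : List ((Int × Int) × Option (Int × Int)) → (Int × Int) → List ((Int × Int) × Option (Int × Int))
  | [], _ => []
  | [e], p => [(e.1, some p)]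
  | e :: e' :: es, p => e :: pvSetLast (e' :: es) p

-- one iteration of A's `for i, point in enumerate(path)` loop; state none = exception raised
def pvStepA (path : List (Int × Int))
    (st : Option (List ((Int × Int) × Option (Int × Int)) × Option Bool)) (ip : Int × (Int × Int)) :
    Option (List ((Int × Int) × Option (Int × Int)) × Option Bool) :=
  match st with
  | none => none
  | some (edges, direction) =>
    if ip.1 = 0 then some (edges ++ [(ip.2, none)], direction)
    else if ip.1 = 1 then
      match PySem.List.pyGet? path 0 with
      | none => none
      | some p0 =>
        if ip.2.1 = p0.1 then some (edges, some true)
        else if ip.2.2 = p0.2 then some (edges, some false)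
        else none  -- raise Exception('Invalid path')
    else
      match PySem.List.pyGet? path (ip.1 - 1) with
      | none => none
      | some prev =>
        let cur : Option Bool :=
          if ip.2.1 = prev.1 then some true
          else if ip.2.2 = prev.2 then some false
          else none
        match cur with
        | none => none  -- raise Exception('Invalid path')
        | some c =>
          if (some c : Option Bool) ≠ direction then
            some (pvCloseLast edges prev ++ [(prev, none)], some c)
          else some (edges, direction)

def path_to_edges (path : List (Int × Int)) : List (List (Int × Int)) :=
  match (PySem.List.enumerate path).foldl (pvStepA path) (some ([], none)) with
  | none => []  -- Python raises Exception('Invalid path') here; excluded by Pre_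
  | some (edges, _) =>
    match path.getLast? with
    | none => []  -- empty path: Python raises IndexError at edges[-1]; excluded by Pre_
    | some last =>
      (pvSetLast edges last).map (fun e => match e.2 with | some b => [e.1, b] | none => [e.1])

-- ===== PORT B =====
-- one iteration of B's `for point in path[1:]` loop; state = (corners, prev, direction)
def pvStepB (st : Option (List (Int × Int) × (Int × Int) × Option Bool)) (point : Int × Int) :
    Option (List (Int × Int) × (Int × Int) × Option Bool) :=
  match st with
  | none => none
  | some (corners, prev, direction) =>
    let axis : Option Bool :=
      if point.1 = prev.1 then some true
      else if point.2 = prev.2 then some false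
      else none
    match axis with
    | none => none  -- raise Exception('Invalid path')
    | some a =>
      match direction with
      | none => some (corners, point, some a)
      | some d => if a ≠ d then some (corners ++ [prev], point, some a) else some (corners, point, some d)

def path_to_edges_alt (path : List (Int × Int)) : List (List (Int × Int)) :=
  match path with
  | [] => []  -- Python raises IndexError at path[0]; excluded by Pre_
  | p0 :: rest =>
    match rest.foldl pvStepB (some ([p0], p0, none)) with
    | none => []  -- Python raises Exception('Invalid path'); excluded by Pre_
    | some (corners, _, _) =>
      let cs := corners ++ [rest.getLastD p0]  -- corners.append(path[-1])
      (cs.zip cs.tail).map (fun ab => [ab.1, ab.2])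

-- ===== PRECONDITION & SPEC =====
-- Pre_ excludes exactly the inputs where Python A raises: the empty path (IndexError) and
-- paths with a consecutive pair sharing neither coordinate (Exception('Invalid path')).
-- every consecutive pair shares the x- or the y-coordinate
def pvValidSeg : List (Int × Int) → Bool
  | [] => true
  | [_] => true
  | a :: b :: t => (b.1 = a.1 || b.2 = a.2) && pvValidSeg (b :: t)

def Pre_path_to_edges (path : List (Int × Int)) : Prop :=
  path ≠ [] ∧ pvValidSeg path = true
instance (path : List (Int × Int)) : Decidable (Pre_path_to_edges path) := by
  unfold Pre_path_to_edges; infer_instance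
def pvWitness_path_to_edges : (List (Int × Int)) := ([(0, 0), (0, 2), (3, 2), (3, 5)])

def Spec_path_to_edges (path : List (Int × Int)) (out : List (List (Int × Int))) : Prop := out = path_to_edges_alt path
instance (path : List (Int × Int)) (out : List (List (Int × Int))) : Decidable (Spec_path_to_edges path out) := by unfold Spec_path_to_edges; infer_instance

-- ===== CLAIM (what is proved, stated in full; the proofs are below) =====
def Claim_equal_path_to_edges : Prop := ∀ (path : List (Int × Int)), Dom_path_to_edges path → Pre_path_to_edges path → Spec_path_to_edges path (path_to_edges path)

-- ===== LEMMAS AND PROOFS =====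

-- A's edges list, expressed through B's corner list: the closed edges between consecutive
-- corners plus the currently open edge starting at the last corner.
def pvClosedE (cs : List (Int × Int)) : List ((Int × Int) × Option (Int × Int)) :=
  (cs.zip cs.tail).map (fun ab => (ab.1, some ab.2))

def pvOpenE (cs : List (Int × Int)) : List ((Int × Int) × Option (Int × Int)) :=
  pvClosedE cs ++ [(cs.getLastD (0, 0), none)]

theorem pvFoldA_none (path : List (Int × Int)) (l : List (Int × (Int × Int))) :
    l.foldl (pvStepA path) none = none := by
  induction l with
  | nil => rfl
  | cons x l ih => simpa [pvStepA] using ih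

theorem pvFoldB_none (l : List (Int × Int)) : l.foldl pvStepB none = none := by
  induction l with
  | nil => rfl
  | cons x l ih => simpa [pvStepB] using ih

theorem pvCloseLast_append (xs : List ((Int × Int) × Option (Int × Int))) (a p : Int × Int) :
    pvCloseLast (xs ++ [(a, none)]) p = xs ++ [(a, some p)] := by
  induction xs with
  | nil => simp [pvCloseLast]
  | cons x xs ih =>
    cases xs with
    | nil => simp [pvCloseLast]
    | cons y ys => simpa [pvCloseLast] using ih

theorem pvSetLast_append (xs : List ((Int × Int) × Option (Int × Int))) (a : Int × Int)
    (b : Option (Int × Int)) (p : Int × Int) :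
    pvSetLast (xs ++ [(a, b)]) p = xs ++ [(a, some p)] := by
  induction xs with
  | nil => simp [pvSetLast]
  | cons x xs ih =>
    cases xs with
    | nil => simp [pvSetLast]
    | cons y ys => simpa [pvSetLast] using ih

theorem pvZip_append_last (cs : List (Int × Int)) (p : Int × Int) (h : cs ≠ []) :
    (cs ++ [p]).zip ((cs ++ [p]).tail) = cs.zip cs.tail ++ [(cs.getLastD (0, 0), p)] := by
  induction cs with
  | nil => simp at h
  | cons c cs ih =>
    cases cs with
    | nil => simp
    | cons y ys => simpa using ih (by simp)

theorem pvClosedE_append (cs : List (Int × Int)) (p : Int × Int) (h : cs ≠ []) :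
    pvClosedE (cs ++ [p]) = pvClosedE cs ++ [(cs.getLastD (0, 0), some p)] := by
  simp [pvClosedE, pvZip_append_last cs p h]

theorem pvFoldB_ne_nil (l : List (Int × Int)) :
    ∀ (corners : List (Int × Int)) (prev : Int × Int) (d : Option Bool)
      (res : List (Int × Int) × (Int × Int) × Option Bool),
      l.foldl pvStepB (some (corners, prev, d)) = some res → corners ≠ [] → res.1 ≠ [] := by
  induction l with
  | nil => intro corners prev d res h hc; cases h; simpa using hc
  | cons q l ih =>
    intro corners prev d res h hc
    simp only [List.foldl_cons] at h
    by_cases h1 : q.1 = prev.1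
    · cases d with
      | none => exact ih _ _ _ _ (by simpa [pvStepB, h1] using h) hc
      | some dd =>
        by_cases hd : true ≠ dd
        · exact ih _ _ _ _ (by simpa [pvStepB, h1, hd] using h) (by simp [hc])
        · exact ih _ _ _ _ (by simpa [pvStepB, h1, hd] using h) hc
    · by_cases h2 : q.2 = prev.2
      · cases d with
        | none => exact ih _ _ _ _ (by simpa [pvStepB, h1, h2] using h) hc
        | some dd =>
          by_cases hd : false ≠ dd
          · exact ih _ _ _ _ (by simpa [pvStepB, h1, h2, hd] using h) (by simp [hc])
          · exact ih _ _ _ _ (by simpa [pvStepB, h1, h2, hd] using h) hc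
      · rw [show pvStepB (some (corners, prev, d)) q = none by simp [pvStepB, h1, h2],
          pvFoldB_none] at h
        cases h

theorem pvGetPred (pre suf : List (Int × Int)) (h : pre ≠ []) :
    PySem.List.pyGet? (pre ++ suf) ((pre.length : Int) - 1) = some (pre.getLastD (0, 0)) := by
  induction pre using List.reverseRecOn with
  | nil => simp at h
  | append_singleton xs x _ =>
    have : ((xs ++ [x]).length : Int) - 1 = (xs.length : Nat) := by simp
    rw [this, List.append_assoc, List.singleton_append, PySem.List.pyGet?_natCast]
    simp

theorem pvSim (path : List (Int × Int)) (suf : List (Int × Int)) :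
    ∀ (pre corners : List (Int × Int)) (d : Bool),
      path = pre ++ suf → 2 ≤ pre.length → corners ≠ [] →
      (PySem.List.enumerate suf (pre.length : Int)).foldl (pvStepA path)
          (some (pvOpenE corners, some d)) =
        Option.map (fun s => (pvOpenE s.1, s.2.2))
          (suf.foldl pvStepB (some (corners, pre.getLastD (0, 0), some d))) := by
  induction suf with
  | nil => intro pre corners d hpath hlen hc; simp [PySem.List.enumerate_nil]
  | cons q suf ih =>
    intro pre corners d hpath hlen hc
    rw [PySem.List.enumerate_cons]
    simp only [List.foldl_cons]
    have hne : pre ≠ [] := by intro h; rw [h] at hlen; simp at hlen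
    have hget : PySem.List.pyGet? path ((pre.length : Int) - 1) = some (pre.getLastD (0, 0)) := by
      rw [hpath]; exact pvGetPred pre (q :: suf) hne
    have hi0 : ((pre.length : Int) ≠ 0) := by omega
    have hi1 : ((pre.length : Int) ≠ 1) := by omega
    set prevEl := pre.getLastD (0, 0) with hprev
    have hstepA : pvStepA path (some (pvOpenE corners, some d)) ((pre.length : Int), q) =
        (if q.1 = prevEl.1 then
          (if true ≠ d then some (pvCloseLast (pvOpenE corners) prevEl ++ [(prevEl, none)], some true)
           else some (pvOpenE corners, some d))
         else if q.2 = prevEl.2 then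
          (if false ≠ d then some (pvCloseLast (pvOpenE corners) prevEl ++ [(prevEl, none)], some false)
           else some (pvOpenE corners, some d))
         else none) := by
      simp only [pvStepA, hi0, hi1, if_false, hget]
      by_cases h1 : q.1 = prevEl.1 <;> by_cases h2 : q.2 = prevEl.2 <;>
        simp [h1, h2]
    have hclose : pvCloseLast (pvOpenE corners) prevEl ++ [(prevEl, none)] =
        pvOpenE (corners ++ [prevEl]) := by
      rw [pvOpenE, pvCloseLast_append]
      rw [pvOpenE, pvClosedE_append corners prevEl hc]
      simp
    have hlen' : 2 ≤ (pre ++ [q]).length := by simp; omega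
    have hpath' : path = (pre ++ [q]) ++ (suf) := by rw [hpath]; simp
    have hstart : (pre.length : Int) + 1 = (((pre ++ [q]).length : Nat) : Int) := by simp
    have hlast' : (pre ++ [q]).getLastD (0, 0) = q := by simp
    by_cases h1 : q.1 = prevEl.1
    · by_cases hd : true ≠ d
      · have hdd : d = false := by revert hd; cases d <;> simp
        subst hdd
        rw [hstepA, if_pos h1, if_pos hd, hclose, hstart,
          ih (pre ++ [q]) (corners ++ [prevEl]) true hpath' hlen' (by simp), hlast']
        have hB : pvStepB (some (corners, prevEl, some false)) q =
            some (corners ++ [prevEl], q, some true) := by simp [pvStepB, h1]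
        rw [hB]
      · have hdd : d = true := by revert hd; cases d <;> simp
        subst hdd
        rw [hstepA, if_pos h1, if_neg hd, hstart,
          ih (pre ++ [q]) corners true hpath' hlen' hc, hlast']
        have hB : pvStepB (some (corners, prevEl, some true)) q =
            some (corners, q, some true) := by simp [pvStepB, h1]
        rw [hB]
    · by_cases h2 : q.2 = prevEl.2
      · by_cases hd : false ≠ d
        · have hdd : d = true := by revert hd; cases d <;> simp
          subst hdd
          rw [hstepA, if_neg h1, if_pos h2, if_pos hd, hclose, hstart,
            ih (pre ++ [q]) (corners ++ [prevEl]) false hpath' hlen' (by simp), hlast']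
          have hB : pvStepB (some (corners, prevEl, some true)) q =
              some (corners ++ [prevEl], q, some false) := by simp [pvStepB, h1, h2]
          rw [hB]
        · have hdd : d = false := by revert hd; cases d <;> simp
          subst hdd
          rw [hstepA, if_neg h1, if_pos h2, if_neg hd, hstart,
            ih (pre ++ [q]) corners false hpath' hlen' hc, hlast']
          have hB : pvStepB (some (corners, prevEl, some false)) q =
              some (corners, q, some false) := by simp [pvStepB, h1, h2]
          rw [hB]
      · rw [hstepA, if_neg h1, if_neg h2, pvFoldA_none]
        have hB : pvStepB (some (corners, prevEl, some d)) q = none := by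
          simp [pvStepB, h1, h2]
        rw [hB, pvFoldB_none]
        rfl

theorem pvGetLast_cons {α : Type} (l : List α) : ∀ (a : α), (a :: l).getLast? = some (l.getLastD a) := by
  induction l with
  | nil => intro a; rfl
  | cons b l ih => intro a; rw [List.getLast?_cons_cons, ih b, List.getLastD_cons]

theorem pvUnwrap_closed (cs : List (Int × Int)) :
    (pvClosedE cs).map (fun e => match e.2 with | some b => [e.1, b] | none => [e.1]) =
      (cs.zip cs.tail).map (fun ab => [ab.1, ab.2]) := by
  simp [pvClosedE, List.map_map, Function.comp]

theorem pvTail (p0 p1 : Int × Int) (rest : List (Int × Int)) (d : Bool) :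
    (match Option.map (fun s => (pvOpenE s.1, s.2.2))
        (rest.foldl pvStepB (some ([p0], p1, some d))) with
     | none => []
     | some (edges, _) =>
       match (p0 :: p1 :: rest).getLast? with
       | none => []
       | some last =>
         (pvSetLast edges last).map
           (fun e : (Int × Int) × Option (Int × Int) =>
             match e.2 with | some b => [e.1, b] | none => [e.1])) =
      (match rest.foldl pvStepB (some ([p0], p1, some d)) with
       | none => []
       | some (corners, _, _) =>
         let cs := corners ++ [(p1 :: rest).getLastD p0]
         (cs.zip cs.tail).map (fun ab : (Int × Int) × (Int × Int) => [ab.1, ab.2])) := by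
  rcases hf : rest.foldl pvStepB (some ([p0], p1, some d)) with _ | ⟨c, pr, dd⟩
  · rfl
  · have hc : c ≠ [] := pvFoldB_ne_nil rest [p0] p1 (some d) _ hf (by simp)
    simp only [Option.map_some]
    simp only [pvGetLast_cons (p1 :: rest) p0, List.getLastD_cons]
    rw [pvOpenE, pvSetLast_append, ← pvClosedE_append c (rest.getLastD p1) hc, pvUnwrap_closed]

theorem pvAllEq (path : List (Int × Int)) : path_to_edges path = path_to_edges_alt path := by
  match path with
  | [] => rfl
  | [p] =>
    simp [path_to_edges, path_to_edges_alt, PySem.List.enumerate_cons, PySem.List.enumerate_nil,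
      pvStepA, pvSetLast]
  | p0 :: p1 :: rest =>
    rw [path_to_edges, path_to_edges_alt]
    rw [PySem.List.enumerate_cons, PySem.List.enumerate_cons]
    simp only [List.foldl_cons]
    have h0 : pvStepA (p0 :: p1 :: rest) (some ([], none)) ((0 : Int), p0) =
        some ([(p0, none)], none) := by simp [pvStepA]
    rw [h0]
    have hget0 : PySem.List.pyGet? (p0 :: p1 :: rest) 0 = some p0 :=
      PySem.List.pyGet?_zero_cons _ _
    by_cases h1 : p1.1 = p0.1
    · -- direction 'x'
      have h1A : pvStepA (p0 :: p1 :: rest) (some ([(p0, none)], none)) ((0 : Int) + 1, p1) =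
          some ([(p0, none)], some true) := by
        simp [pvStepA, hget0, h1]
      rw [h1A]
      have h1B : pvStepB (some ([p0], p0, none)) p1 = some ([p0], p1, some true) := by
        simp [pvStepB, h1]
      rw [h1B]
      rw [show ((0 : Int) + 1 + 1) = (([p0, p1].length : Nat) : Int) by norm_num,
        show [((p0 : Int × Int), (none : Option (Int × Int)))] = pvOpenE [p0] from rfl,
        pvSim (p0 :: p1 :: rest) rest [p0, p1] [p0] true (by simp) (by simp) (by simp)]
      simpa using pvTail p0 p1 rest true
    · by_cases h2 : p1.2 = p0.2
      · -- direction 'y'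
        have h1A : pvStepA (p0 :: p1 :: rest) (some ([(p0, none)], none)) ((0 : Int) + 1, p1) =
            some ([(p0, none)], some false) := by
          simp [pvStepA, hget0, h1, h2]
        rw [h1A]
        have h1B : pvStepB (some ([p0], p0, none)) p1 = some ([p0], p1, some false) := by
          simp [pvStepB, h1, h2]
        rw [h1B]
        rw [show ((0 : Int) + 1 + 1) = (([p0, p1].length : Nat) : Int) by norm_num,
          show [((p0 : Int × Int), (none : Option (Int × Int)))] = pvOpenE [p0] from rfl,
          pvSim (p0 :: p1 :: rest) rest [p0, p1] [p0] false (by simp) (by simp) (by simp)]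
        simpa using pvTail p0 p1 rest false
      · -- invalid first segment: both raise
        have h1A : pvStepA (p0 :: p1 :: rest) (some ([(p0, none)], none)) ((0 : Int) + 1, p1) =
            none := by simp [pvStepA, hget0, h1, h2]
        rw [h1A, pvFoldA_none]
        have h1B : pvStepB (some ([p0], p0, none)) p1 = none := by simp [pvStepB, h1, h2]
        rw [h1B, pvFoldB_none]

-- ===== VERDICT (by name: the statement is the Claim_ definition above) =====
theorem path_to_edges_spec : Claim_equal_path_to_edges := by
  intro path _ _
  unfold Spec_path_to_edges
  exact pvAllEq path
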